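-- pv_equiv track=rewrite | github.com/tarunms7/codegraph | codegraph/ranker.py | _keywords_in_order
-- ===== SOURCE A (Python) =====
-- def _keywords_in_order(tokens: list[str], keywords: list[str]) -> bool:
--     """Check whether keywords appear in order inside a token sequence."""
--     if not keywords:
--         return False
--
--     index = 0
--     for token in tokens:
--         if token == keywords[index]:
--             index += 1
--             if index == len(keywords):
--                 return True
--     return False
-- ===== SOURCE B (Python) =====
-- def _keywords_in_order(tokens: list[str], keywords: list[str]) -> bool:
--     """Check whether keywords appear in order inside a token sequence."""
--     if not keywords:
--         return False
--     positions = {}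
--     for i, token in enumerate(tokens):
--         positions.setdefault(token, []).append(i)
--     cur = 0
--     for kw in keywords:
--         hit = next((p for p in positions.get(kw, []) if p >= cur), None)
--         if hit is None:
--             return False
--         cur = hit + 1
--     return True
-- ===== Notes on version B (the rewrite author's own statement) =====
-- stated objective: alternative
-- what changed: B builds an inverted index (token -> ordered list of positions) in one pass and then resolves each keyword by scanning its own position list for the first position at or after a cursor, so the token-by-token scan with an advancing keyword index disappears.
import Mathlib
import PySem

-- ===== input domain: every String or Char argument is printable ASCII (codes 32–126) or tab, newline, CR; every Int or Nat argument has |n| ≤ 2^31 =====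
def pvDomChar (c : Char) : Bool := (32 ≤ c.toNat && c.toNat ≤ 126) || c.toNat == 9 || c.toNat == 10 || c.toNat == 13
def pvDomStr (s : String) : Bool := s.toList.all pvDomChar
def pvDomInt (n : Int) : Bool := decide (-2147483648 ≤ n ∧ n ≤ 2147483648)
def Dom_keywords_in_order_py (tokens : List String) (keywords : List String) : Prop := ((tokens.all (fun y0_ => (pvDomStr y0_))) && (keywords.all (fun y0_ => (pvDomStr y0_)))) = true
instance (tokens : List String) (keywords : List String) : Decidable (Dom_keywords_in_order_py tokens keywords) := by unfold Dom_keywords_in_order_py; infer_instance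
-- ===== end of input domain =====

-- B replaces A's token scan (advancing keyword index) by a different algorithm: build an
-- inverted index token -> ordered positions once, then resolve each keyword from its own
-- position list against a cursor (objective: alternative; same results).


-- ===== PORT A =====
-- the for-loop over tokens carrying the keyword index (index is always in range
-- when keywords[index] is read; the `none` branch is unreachable)
def pvALoop (keywords : List String) : List String → Nat → Bool
  | [], _ => false
  | token :: rest, index =>
    if keywords[index]? = some token then
      if index + 1 = keywords.length then true
      else pvALoop keywords rest (index + 1)
    else pvALoop keywords rest index

def keywords_in_order_py (tokens : List String) (keywords : List String) : Bool :=
  if keywords = [] then false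
  else pvALoop keywords tokens 0

-- ===== PORT B =====
-- `for i, token in enumerate(tokens): positions.setdefault(token, []).append(i)`
-- (in-place append to the list stored under `token` = Dict.modify with default [])
def pvBuildPositions (tokens : List String) : PySem.Dict String (List Int) :=
  (PySem.List.enumerate tokens).foldl
    (fun d p => d.modify p.2 [] (fun ps => ps ++ [p.1])) PySem.Dict.empty

-- `next((p for p in ps if p >= cur), None)`
def pvNextHit (ps : List Int) (cur : Int) : Option Int := ps.find? (fun p => cur ≤ p)

-- `for kw in keywords:` resolving each keyword from its position list against the cursor
def pvBLoop (pos : PySem.Dict String (List Int)) : List String → Int → Bool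
  | [], _ => true
  | kw :: kws, cur =>
    match pvNextHit (pos.getD kw []) cur with
    | none => false
    | some hit => pvBLoop pos kws (hit + 1)

def keywords_in_order_py_alt (tokens : List String) (keywords : List String) : Bool :=
  if keywords = [] then false
  else pvBLoop (pvBuildPositions tokens) keywords 0

-- ===== PRECONDITION & SPEC =====
def Spec_keywords_in_order_py (tokens : List String) (keywords : List String) (out : Bool) : Prop := out = keywords_in_order_py_alt tokens keywords
instance (tokens : List String) (keywords : List String) (out : Bool) : Decidable (Spec_keywords_in_order_py tokens keywords out) := by unfold Spec_keywords_in_order_py; infer_instance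

-- ===== CLAIM (what is proved, stated in full; the proofs are below) =====
def Claim_equal_keywords_in_order_py : Prop := ∀ (tokens : List String) (keywords : List String), Dom_keywords_in_order_py tokens keywords → Spec_keywords_in_order_py tokens keywords (keywords_in_order_py tokens keywords)

-- ===== LEMMAS AND PROOFS =====

-- reference greedy subsequence test both ports are reduced to
def pvSub : List String → List String → Bool
  | [], _ => true
  | _ :: _, [] => false
  | k :: ks, t :: ts => if t = k then pvSub ks ts else pvSub (k :: ks) ts

-- positions (as Ints) at which kw occurs in l, counting from b
def pvOcc : List String → String → Nat → List Int
  | [], _, _ => []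
  | t :: ts, kw, b => if t = kw then (b : Int) :: pvOcc ts kw (b+1) else pvOcc ts kw (b+1)

theorem pvGet_append_len (pre : List String) (k : String) (ks : List String) :
    (pre ++ k :: ks)[pre.length]? = some k := by
  induction pre with
  | nil => rfl
  | cons p ps ih => simp

-- A's loop from keyword index |pre| is the greedy test on the remaining keywords
theorem pvALoop_eq_sub (tokens : List String) : ∀ (pre : List String) (k : String) (ks : List String),
    pvALoop (pre ++ k :: ks) tokens pre.length = pvSub (k :: ks) tokens := by
  induction tokens with
  | nil => intro pre k ks; cases ks <;> rfl
  | cons t ts ih =>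
    intro pre k ks
    by_cases hk : t = k
    · subst hk
      cases ks with
      | nil =>
        simp [pvALoop, pvSub]
      | cons k' ks' =>
        have hlen : pre.length + 1 ≠ (pre ++ t :: k' :: ks').length := by simp
        have hrw : pre ++ t :: k' :: ks' = (pre ++ [t]) ++ k' :: ks' := by simp
        have := ih (pre ++ [t]) k' ks'
        simp only [List.length_append, List.length_cons, List.length_nil] at this
        simp only [pvALoop, pvSub, pvGet_append_len, if_neg hlen]
        rw [hrw]
        simpa using this
    · have hget : (pre ++ k :: ks)[pre.length]? ≠ some t := by
        rw [pvGet_append_len]; exact fun h => hk (Option.some.inj h).symm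
      simp only [pvALoop, if_neg hget, pvSub, if_neg hk]
      exact ih pre k ks

theorem pvOcc_enumerate (kw : String) (tokens : List String) : ∀ (b : Nat),
    ((((PySem.List.enumerate tokens (b : Int)).map Prod.swap).filter
      (fun p => p.1 == kw)).map (·.2)) = pvOcc tokens kw b := by
  induction tokens with
  | nil => intro b; rfl
  | cons t ts ih =>
    intro b
    rw [PySem.List.enumerate_cons,
      show ((b : Int) + 1) = ((b + 1 : Nat) : Int) from by push_cast; ring]
    by_cases hk : t = kw
    · simp only [List.map_cons, Prod.swap_prod_mk, List.filter_cons, hk, beq_self_eq_true,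
        if_pos, List.map_cons, pvOcc, ih (b+1)]
    · simp only [List.map_cons, Prod.swap_prod_mk, List.filter_cons, beq_iff_eq,
        if_neg hk, pvOcc, ih (b+1)]

-- the inverted index stores under kw exactly the ordered occurrence positions of kw
theorem pvBuild_getD (tokens : List String) (kw : String) :
    (pvBuildPositions tokens).getD kw [] = pvOcc tokens kw 0 := by
  have hfold : pvBuildPositions tokens
      = ((PySem.List.enumerate tokens).map Prod.swap).foldl
          (fun d (q : String × Int) => d.modify q.1 ([] : List Int) (fun ps => ps ++ [q.2]))
          PySem.Dict.empty := by
    rw [List.foldl_map]; rfl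
  rw [hfold, PySem.Dict.getD_foldl_modify_append]
  simpa using pvOcc_enumerate kw tokens 0

theorem pvOcc_le (kw : String) : ∀ (l : List String) (b : Nat) (p : Int), p ∈ pvOcc l kw b → (b : Int) ≤ p := by
  intro l
  induction l with
  | nil => intro b p h; simp [pvOcc] at h
  | cons t ts ih =>
    intro b p h
    by_cases hk : t = kw <;> simp only [pvOcc, if_pos, hk] at h
    · rcases List.mem_cons.mp h with h | h
      · omega
      · have := ih (b+1) p h; push_cast at this ⊢; omega
    · have := ih (b+1) p h; push_cast at this ⊢; omega

theorem pvFind_congr {l : List Int} {p q : Int → Bool} (h : ∀ a ∈ l, p a = q a) :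
    l.find? p = l.find? q := by
  induction l with
  | nil => rfl
  | cons x xs ih =>
    have hx := h x (List.mem_cons_self)
    by_cases hp : p x = true <;>
      simp [hp, hx ▸ hp, ih (fun a ha => h a (List.mem_cons_of_mem _ ha))]

-- searching the occurrence list for the first position ≥ b + c = first index of kw in l.drop c
theorem pvOcc_find (kw : String) : ∀ (l : List String) (b c : Nat),
    (pvOcc l kw b).find? (fun p => ((b + c : Nat) : Int) ≤ p)
      = ((l.drop c).findIdx? (fun t => t == kw)).map (fun j => ((b + c + j : Nat) : Int)) := by
  intro l
  induction l with
  | nil => intro b c; simp [pvOcc]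
  | cons t ts ih =>
    intro b c
    cases c with
    | zero =>
      by_cases hk : t = kw
      · simp [pvOcc, hk, List.findIdx?_cons]
      · have hcong : (pvOcc ts kw (b+1)).find? (fun p => ((b + 0 : Nat) : Int) ≤ p)
            = (pvOcc ts kw (b+1)).find? (fun p => ((b + 1 + 0 : Nat) : Int) ≤ p) := by
          refine pvFind_congr (fun a ha => ?_)
          have hle := pvOcc_le kw ts (b+1) a ha
          simp only [decide_eq_decide]
          push_cast at hle ⊢
          omega
        simp only [pvOcc, hcong, ih (b+1) 0, List.drop_zero, List.findIdx?_cons,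
          beq_iff_eq, if_neg hk]
        cases h : ts.findIdx? (fun t => t == kw) with
        | none => rfl
        | some j =>
          simp only [Option.map_some, Option.some.injEq]
          push_cast; ring
    | succ c' =>
      have hbc : b + (c' + 1) = (b + 1) + c' := by omega
      by_cases hk : t = kw
      · have hfalse : (fun p => decide (((b + (c'+1) : Nat) : Int) ≤ p)) (b : Int) = false := by
          simp only [decide_eq_false_iff_not]; push_cast; omega
        simp only [pvOcc, if_pos hk, List.find?_cons, hfalse, List.drop_succ_cons]
        rw [hbc, ih (b+1) c']
      · simp only [pvOcc, if_neg hk, List.drop_succ_cons]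
        rw [hbc, ih (b+1) c']

-- greedy test = first occurrence of the head keyword, then recurse past it
theorem pvSub_first (kw : String) (kws : List String) : ∀ (l : List String),
    pvSub (kw :: kws) l
      = match l.findIdx? (fun t => t == kw) with
        | none => false
        | some j => pvSub kws (l.drop (j+1)) := by
  intro l
  induction l with
  | nil => rfl
  | cons t ts ih =>
    by_cases hk : t = kw
    · simp [pvSub, hk, List.findIdx?_cons]
    · simp only [pvSub, List.findIdx?_cons, beq_iff_eq, if_neg hk, ih]
      cases h : ts.findIdx? (fun t => t == kw) <;> simp

-- B's keyword loop from cursor c is the greedy test on the remaining tokens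
theorem pvBLoop_eq_sub (tokens : List String) : ∀ (kws : List String) (c : Nat), c ≤ tokens.length →
    pvBLoop (pvBuildPositions tokens) kws ((c : Nat) : Int) = pvSub kws (tokens.drop c) := by
  intro kws
  induction kws with
  | nil => intro c _; cases h : tokens.drop c <;> rfl
  | cons kw kws ih =>
    intro c hc
    have h0 : (0 : Nat) + c = c := by omega
    have hfind := pvOcc_find kw tokens 0 c
    rw [h0] at hfind
    simp only [pvBLoop, pvNextHit, pvBuild_getD, hfind, pvSub_first]
    cases h : (tokens.drop c).findIdx? (fun t => t == kw) with
    | none => rfl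
    | some j =>
      have hj : j < (tokens.drop c).length :=
        (List.findIdx?_eq_some_iff_getElem.mp h).1
      have hlen : c + j + 1 ≤ tokens.length := by
        simp only [List.length_drop] at hj; omega
      have hcast : ((c + j : Nat) : Int) + 1 = ((c + j + 1 : Nat) : Int) := by push_cast; ring
      simp only [Option.map_some, hcast, ih (c + j + 1) hlen, List.drop_drop]
      rw [show c + (j + 1) = c + j + 1 from by omega]

-- ===== VERDICT (by name: the statement is the Claim_ definition above) =====
theorem keywords_in_order_py_spec : Claim_equal_keywords_in_order_py := by
  intro tokens keywords _
  unfold Spec_keywords_in_order_py keywords_in_order_py keywords_in_order_py_alt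
  cases keywords with
  | nil => rfl
  | cons k ks =>
    have hA := pvALoop_eq_sub tokens [] k ks
    have hB := pvBLoop_eq_sub tokens (k :: ks) 0 (by omega)
    simp only [List.nil_append, List.length_nil] at hA
    simp only [Nat.cast_zero, List.drop_zero] at hB
    simp [hA, hB]
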